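-- pv_equiv track=rewrite | github.com/miliar/Code_Jam_Webscraper | solutions_python/Problem_178/1645.py | make_happy_pancakes
-- ===== SOURCE A (Python) =====
-- def make_happy_pancakes(stack):
-- 	last = len(stack) - 1
-- 	flips = 0
--
-- 	while sum(stack) < len(stack):
-- 		for i in range(last, -1, -1):
-- 			if not stack[i]:
-- 				last = i
-- 				break
--
-- 		first = -1
--
-- 		for i in range(len(stack)):
-- 			if not stack[i]:
-- 				first = i - 1
-- 				break
--
-- 		if first >= 0:
-- 			stack = flip_pancakes(stack, first)
-- 			flips += 1
--
-- 		stack = flip_pancakes(stack, last)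
-- 		flips += 1
--
-- 	return flips
--
-- def flip_pancakes(stack, index):
-- 	for i in range(index + 1):
-- 		if not stack[i]:
-- 			stack[i] = 1
-- 		else:
-- 			stack[i] = 0
-- 	return stack
-- ===== SOURCE B (Python) =====
-- def make_happy_pancakes(stack):
--     # One pass from the top of the stack: each change of side (counting an
--     # imaginary happy pancake beyond the end) costs exactly one flip.
--     flips = 0
--     prev = True
--     for x in reversed(stack):
--         cur = bool(x)
--         if cur != prev:
--             flips += 1
--         prev = cur
--     return flips
-- ===== Notes on version B (the rewrite author's own statement) =====
-- stated objective: alternative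
-- what changed: Replaces A's simulate-the-flips while-loop (repeated rescans and prefix flips) by a single pass over the reversed stack that counts side changes (adjacent truthiness transitions, plus one for the imaginary happy pancake past the end).
-- outside the precondition, e.g. on make_happy_pancakes([5, -5]): A returns 2, B returns 0; on make_happy_pancakes([0, -5]): A does not finish within the time limit, B returns 1; on make_happy_pancakes([2, 0]): A returns 0, B returns 2
import Mathlib
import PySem

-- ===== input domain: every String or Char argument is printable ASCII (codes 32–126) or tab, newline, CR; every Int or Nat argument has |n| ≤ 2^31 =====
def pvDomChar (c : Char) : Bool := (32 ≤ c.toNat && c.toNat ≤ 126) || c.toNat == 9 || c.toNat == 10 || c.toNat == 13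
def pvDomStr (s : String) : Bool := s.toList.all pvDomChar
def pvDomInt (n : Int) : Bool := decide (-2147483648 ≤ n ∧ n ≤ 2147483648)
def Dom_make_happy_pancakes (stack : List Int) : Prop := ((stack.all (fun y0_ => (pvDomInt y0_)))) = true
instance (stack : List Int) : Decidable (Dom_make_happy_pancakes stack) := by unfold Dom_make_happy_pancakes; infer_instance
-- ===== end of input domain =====

-- B replaces A's flip-by-flip simulation by one linear pass counting side changes; Python A also
-- mutates its argument list in place (B does not) — the equivalence proved here is about the return value.

-- ===== PORT A =====
-- flip_pancakes(stack, index): toggle stack[0..index] (Python truthiness: 0 is the only falsy int)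
def pyFlipPancakes (stack : List Int) (index : Int) : List Int :=
  (PySem.List.pyRange 0 (index + 1) 1).foldl
    (fun st i => st.set i.toNat (if PySem.List.pyGetD st i 1 = 0 then 1 else 0))
    stack

-- 'for i in range(last, -1, -1): if not stack[i]: last = i; break'
def pyFindLast (stack : List Int) (last : Int) : Int :=
  match (PySem.List.pyRange last (-1) (-1)).find? (fun i => PySem.List.pyGetD stack i 1 == 0) with
  | some i => i
  | none => last

-- 'first = -1; for i in range(len(stack)): if not stack[i]: first = i - 1; break'
def pyFindFirst (stack : List Int) : Int :=
  match (PySem.List.pyRange 0 (stack.length : Int) 1).find? (fun i => PySem.List.pyGetD stack i 1 == 0) with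
  | some i => i - 1
  | none => -1

-- A's while loop. Python's loop can diverge outside Pre_ (non-0/1 entries); the port carries fuel
-- length+1, proved sufficient on every input satisfying Pre_ (the flip count never exceeds the length).
def loopA : Nat → List Int → Int → Int → Int
  | 0, _, _, flips => flips
  | fuel + 1, stack, last, flips =>
    if stack.sum < (stack.length : Int) then
      let last1 := pyFindLast stack last
      let first := pyFindFirst stack
      let p : List Int × Int :=
        if first ≥ 0 then (pyFlipPancakes stack first, flips + 1) else (stack, flips)
      loopA fuel (pyFlipPancakes p.1 last1) last1 (p.2 + 1)
    else flips

def make_happy_pancakes (stack : List Int) : Int :=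
  loopA (stack.length + 1) stack ((stack.length : Int) - 1) 0

-- ===== PORT B =====
def make_happy_pancakes_alt (stack : List Int) : Int :=
  (stack.reverse.foldl
    (fun (st : Bool × Int) x =>
      let cur : Bool := x != 0
      (cur, if cur != st.1 then st.2 + 1 else st.2))
    (true, 0)).2

-- ===== PRECONDITION & SPEC =====
-- Pre_ admits the 0/1 stacks the function is written for, plus the already-happy inputs
-- (no zero entry and sum ≥ length) on which A returns 0 at once and B agrees. It excludes the
-- remaining non-0/1 stacks: there A's 'sum < len' guard makes the while-loop run on garbage, so it
-- either never terminates (e.g. [0, -5]) or halts with an accidental artefact value (e.g. [5, -5] → 2).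
def Pre_make_happy_pancakes (stack : List Int) : Prop :=
  (∀ x ∈ stack, x = 0 ∨ x = 1) ∨ ((stack.length : Int) ≤ stack.sum ∧ ∀ x ∈ stack, x ≠ 0)
instance (stack : List Int) : Decidable (Pre_make_happy_pancakes stack) := by
  unfold Pre_make_happy_pancakes; infer_instance
def pvWitness_make_happy_pancakes : List Int := [0, 1, 1, 0, 1]

def Spec_make_happy_pancakes (stack : List Int) (out : Int) : Prop := out = make_happy_pancakes_alt stack
instance (stack : List Int) (out : Int) : Decidable (Spec_make_happy_pancakes stack out) := by unfold Spec_make_happy_pancakes; infer_instance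

-- ===== CLAIM (what is proved, stated in full; the proofs are below) =====
def Claim_equal_make_happy_pancakes : Prop := ∀ (stack : List Int), Dom_make_happy_pancakes stack → Pre_make_happy_pancakes stack → Spec_make_happy_pancakes stack (make_happy_pancakes stack)

-- ===== LEMMAS AND PROOFS =====

-- the toggle applied to one pancake
def pvToggle (x : Int) : Int := if x = 0 then 1 else 0

-- flip the first n pancakes
def pvFlipP (n : Nat) (l : List Int) : List Int := (l.take n).map pvToggle ++ l.drop n

-- B's scan, as a structural recursion from the front (foldr form of B's reverse foldl):
-- .1 = truthiness of the head (true for []), .2 = the flip count B returns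
def pvFP : List Int → Bool × Int
  | [] => (true, 0)
  | x :: xs =>
    let s := pvFP xs
    ((x != 0), if (x != 0) != s.1 then s.2 + 1 else s.2)

-- the one boundary bit that a flip of the first n pancakes changes in pvFP
def pvBit (n : Nat) (l : List Int) : Bool :=
  match l.drop (n - 1) with
  | a :: b :: _ => (a != 0) != (b != 0)
  | [a] => a == 0
  | [] => false

theorem pvFP_fst_nil : (pvFP ([] : List Int)).1 = true := rfl

theorem pvFP_fst_cons (x : Int) (xs : List Int) : (pvFP (x :: xs)).1 = (x != 0) := rfl

theorem foldr_eq_pvFP (l : List Int) :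
    l.foldr (fun x (st : Bool × Int) =>
      let cur : Bool := x != 0
      (cur, if cur != st.1 then st.2 + 1 else st.2)) (true, 0) = pvFP l := by
  induction l with
  | nil => rfl
  | cons x xs ih => simp only [List.foldr_cons, ih]; rfl

theorem alt_eq_pvFP (l : List Int) : make_happy_pancakes_alt l = (pvFP l).2 := by
  unfold make_happy_pancakes_alt
  rw [List.foldl_reverse]
  exact congrArg (fun p => p.2) (foldr_eq_pvFP l)

theorem pvFP_nonneg (l : List Int) : 0 ≤ (pvFP l).2 := by
  induction l with
  | nil => simp [pvFP]
  | cons x xs ih => simp only [pvFP]; split <;> omega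

theorem pvFP_le_len (l : List Int) : (pvFP l).2 ≤ l.length := by
  induction l with
  | nil => simp [pvFP]
  | cons x xs ih => simp only [pvFP, List.length_cons]; split <;> [omega; omega]

theorem pvFP_pos (l : List Int) (h : (0:Int) ∈ l) : 1 ≤ (pvFP l).2 := by
  induction l with
  | nil => simp at h
  | cons x xs ih =>
    have hnn := pvFP_nonneg xs
    simp only [pvFP]
    split
    · omega
    · next hc =>
      have hx : (x != 0) = (pvFP xs).1 := by
        cases hxb : (x != 0) <;> cases hs : (pvFP xs).1 <;> simp [hxb, hs] at hc ⊢
      apply ih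
      by_cases hx0 : x = 0
      · rw [hx0] at hx
        cases hxs : xs with
        | nil => rw [hxs] at hx; simp [pvFP_fst_nil] at hx
        | cons y ys =>
          rw [hxs, pvFP_fst_cons] at hx
          have hy : y = 0 := by simpa using hx.symm
          simp [hy]
      · rcases List.mem_cons.1 h with h0 | h0
        · exact absurd h0.symm hx0
        · exact h0

theorem pvFP_all_one (l : List Int) (h : ∀ x ∈ l, x ≠ 0) :
    (pvFP l).2 = 0 ∧ (pvFP l).1 = true := by
  induction l with
  | nil => simp [pvFP]
  | cons x xs ih =>
    have hx : x ≠ 0 := h x (by simp)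
    have ihh := ih (fun y hy => h y (by simp [hy]))
    simp only [pvFP]
    constructor
    · rw [ihh.2]; simp [hx, ihh.1]
    · simp [hx]

-- sum < len iff a zero exists, for 0/1 stacks
theorem sum_le_len (l : List Int) (hb : ∀ x ∈ l, x = 0 ∨ x = 1) : l.sum ≤ (l.length : Int) := by
  induction l with
  | nil => simp
  | cons x xs ih =>
    have hx := hb x (by simp)
    have := ih (fun y hy => hb y (by simp [hy]))
    simp only [List.sum_cons, List.length_cons]
    push_cast
    rcases hx with h | h <;> omega

theorem sum_lt_iff (l : List Int) (hb : ∀ x ∈ l, x = 0 ∨ x = 1) :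
    (l.sum < (l.length : Int)) ↔ (0:Int) ∈ l := by
  induction l with
  | nil => simp
  | cons x xs ih =>
    have hx := hb x (by simp)
    have ihh := ih (fun y hy => hb y (by simp [hy]))
    have hle : xs.sum ≤ (xs.length : Int) := sum_le_len xs (fun y hy => hb y (by simp [hy]))
    simp only [List.sum_cons, List.length_cons, List.mem_cons]
    push_cast
    rcases hx with h | h
    · subst h
      constructor
      · intro _; left; rfl
      · intro _; omega
    · subst h
      constructor
      · intro hlt; right; exact ihh.1 (by omega)
      · rintro (h1 | h1)
        · exact absurd h1 (by norm_num)
        · have := ihh.2 h1; omega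

-- basic pvFlipP facts
theorem pvFlipP_zero (l : List Int) : pvFlipP 0 l = l := by simp [pvFlipP]

theorem pvFlipP_cons (n : Nat) (x : Int) (xs : List Int) :
    pvFlipP (n + 1) (x :: xs) = pvToggle x :: pvFlipP n xs := by
  simp [pvFlipP]

theorem length_pvFlipP (n : Nat) (l : List Int) : (pvFlipP n l).length = l.length := by
  simp [pvFlipP]; omega

theorem pvFlipP_getD (n : Nat) (l : List Int) (j : Nat) (hn : n ≤ l.length) :
    (pvFlipP n l).getD j 1 = if j < n then pvToggle (l.getD j 1) else l.getD j 1 := by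
  induction l generalizing n j with
  | nil =>
    simp only [List.length_nil, Nat.le_zero] at hn
    subst hn
    simp [pvFlipP]
  | cons x xs ih =>
    cases n with
    | zero => simp [pvFlipP_zero]
    | succ m =>
      rw [pvFlipP_cons]
      cases j with
      | zero => simp
      | succ k =>
        simp only [List.getD_cons_succ]
        rw [ih m k (by simpa using hn)]
        by_cases h : k < m <;> simp [h]

theorem binary_pvFlipP (n : Nat) (l : List Int) (hb : ∀ x ∈ l, x = 0 ∨ x = 1) :
    ∀ x ∈ pvFlipP n l, x = 0 ∨ x = 1 := by
  intro x hx
  rcases List.mem_append.1 hx with h | h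
  · rcases List.mem_map.1 h with ⟨y, _, rfl⟩
    unfold pvToggle; split <;> simp
  · exact hb x (List.mem_of_mem_drop h)

theorem toggle_bne (x : Int) : (pvToggle x != 0) = !(x != 0) := by
  unfold pvToggle; by_cases h : x = 0 <;> simp [h]

theorem pvFP_fst_flip (n : Nat) (l : List Int) (hn : 1 ≤ n) (hl : l ≠ []) :
    (pvFP (pvFlipP n l)).1 = !(pvFP l).1 := by
  cases l with
  | nil => exact absurd rfl hl
  | cons x xs =>
    cases n with
    | zero => omega
    | succ m =>
      rw [pvFlipP_cons, pvFP_fst_cons, pvFP_fst_cons, toggle_bne]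

-- the key flip lemma: flipping the first n pancakes changes B's count by exactly ±1
theorem pvFP_flip (l : List Int) : ∀ n : Nat, 1 ≤ n → n ≤ l.length →
    (pvFP (pvFlipP n l)).2 = (pvFP l).2 + 1 - 2 * (if pvBit n l then 1 else 0) := by
  induction l with
  | nil => intro n h1 h2; simp at h2; omega
  | cons x xs ih =>
    intro n h1 h2
    cases n with
    | zero => omega
    | succ m =>
      cases m with
      | zero =>
        -- n = 1 : flip only the head
        rw [pvFlipP_cons, pvFlipP_zero]
        simp only [pvFP, toggle_bne]
        cases hxs : xs with
        | nil =>
          have : pvBit 1 [x] = (x == 0) := by rfl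
          subst hxs
          rw [this]
          by_cases hx : x = 0 <;> simp [pvFP, hx]
        | cons y ys =>
          have hbit : pvBit 1 (x :: y :: ys) = ((x != 0) != (y != 0)) := rfl
          subst hxs
          rw [hbit, pvFP_fst_cons]
          cases hx : (x != 0) <;> cases hy : (y != 0) <;> simp <;> omega
      | succ k =>
        -- n = k+2 : head toggled, tail flipped with n-1 = k+1
        have hxs : xs ≠ [] := by
          intro h; rw [h] at h2; simp at h2
        rw [pvFlipP_cons]
        simp only [pvFP, toggle_bne]
        rw [pvFP_fst_flip (k + 1) xs (by omega) hxs]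
        rw [ih (k + 1) (by omega) (by simpa using h2)]
        have hbit : pvBit (k + 2) (x :: xs) = pvBit (k + 1) xs := by
          unfold pvBit; rfl
        rw [hbit]
        cases hc : ((x != 0) != (pvFP xs).1) <;> simp [hc] <;> split <;> omega

-- characterisation of the boundary bit
theorem pvBit_eq (n : Nat) (l : List Int) (hn : 1 ≤ n) (hlt : n - 1 < l.length) :
    pvBit n l = if n < l.length then ((l.getD (n - 1) 1 != 0) != (l.getD n 1 != 0))
                else (l.getD (n - 1) 1 == 0) := by
  unfold pvBit
  rw [List.drop_eq_getElem_cons hlt]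
  by_cases hh : n < l.length
  · rw [show n - 1 + 1 = n by omega, List.drop_eq_getElem_cons hh]
    rw [if_pos hh, List.getD_eq_getElem l 1 hlt, List.getD_eq_getElem l 1 hh]
  · rw [show n - 1 + 1 = n by omega, List.drop_eq_nil_of_le (by omega)]
    rw [if_neg hh, List.getD_eq_getElem l 1 hlt]

theorem pvFlipP_set (l : List Int) (m : Nat) (hm : m < l.length) :
    (pvFlipP m l).set m (pvToggle (l.getD m 1)) = pvFlipP (m + 1) l := by
  induction l generalizing m with
  | nil => simp at hm
  | cons x xs ih =>
    cases m with
    | zero => simp [pvFlipP_zero, pvFlipP_cons]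
    | succ k =>
      rw [pvFlipP_cons, pvFlipP_cons]
      simp only [List.set_cons_succ, List.getD_cons_succ]
      rw [ih k (by simpa using hm)]

-- pyFlipPancakes computes pvFlipP
theorem pyFlip_eq (l : List Int) (j : Int) (h0 : 0 ≤ j) (h1 : j < l.length) :
    pyFlipPancakes l j = pvFlipP (j + 1).toNat l := by
  unfold pyFlipPancakes
  have key : ∀ n : Nat, n ≤ l.length →
      (PySem.List.pyRange 0 (n : Int) 1).foldl
        (fun st i => st.set i.toNat (if PySem.List.pyGetD st i 1 = 0 then 1 else 0)) l
      = pvFlipP n l := by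
    intro n
    induction n with
    | zero => intro _; rw [PySem.List.pyRange_one_eq_nil (by omega)]; simp [pvFlipP]
    | succ m ihm =>
      intro hm
      rw [show ((m + 1 : Nat) : Int) = (m : Int) + 1 by push_cast; ring,
          PySem.List.pyRange_one_succ_right (by omega), List.foldl_append,
          ihm (by omega)]
      simp only [List.foldl_cons, List.foldl_nil]
      have hmlt : m < l.length := by omega
      have hget : PySem.List.pyGetD (pvFlipP m l) (m : Int) 1 = l.getD m 1 := by
        rw [PySem.List.pyGetD_natCast, pvFlipP_getD m l m (by omega)]
        simp
      rw [hget]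
      have : (if l.getD m 1 = 0 then (1:Int) else 0) = pvToggle (l.getD m 1) := rfl
      rw [this]
      rw [show ((m : Nat) : Int).toNat = m from Int.toNat_natCast m, pvFlipP_set l m hmlt]
  rw [← key (j + 1).toNat (by omega), show (((j + 1).toNat : Nat) : Int) = j + 1 by omega]

-- find? over the ascending full range returns the first zero's index
theorem find_first_some (l : List Int) (fz : Nat) (hfz : fz < l.length)
    (h0 : l.getD fz 1 = 0) (hmin : ∀ j, j < fz → l.getD j 1 ≠ 0) :
    pyFindFirst l = (fz : Int) - 1 := by
  unfold pyFindFirst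
  have key : ∀ a : Nat, a ≤ fz →
      (PySem.List.pyRange (a : Int) (l.length : Int) 1).find?
        (fun i => PySem.List.pyGetD l i 1 == 0) = some (fz : Int) := by
    intro a ha
    have hterm : fz - a ≤ fz := by omega
    induction hd : fz - a generalizing a with
    | zero =>
      have : a = fz := by omega
      subst this
      rw [PySem.List.pyRange_one_cons (by exact_mod_cast hfz)]
      rw [List.find?_cons]
      have : (PySem.List.pyGetD l (a : Int) 1 == 0) = true := by
        rw [PySem.List.pyGetD_natCast, h0]; rfl
      rw [this]
    | succ m ihm =>
      have halt : a < fz := by omega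
      rw [PySem.List.pyRange_one_cons (by exact_mod_cast (by omega : a < l.length))]
      rw [List.find?_cons]
      have : (PySem.List.pyGetD l (a : Int) 1 == 0) = false := by
        rw [PySem.List.pyGetD_natCast]
        exact beq_eq_false_iff_ne.mpr (hmin a halt)
      rw [this]
      have e : (a : Int) + 1 = ((a + 1 : Nat) : Int) := by push_cast; ring
      rw [e]
      exact ihm (a + 1) (by omega) (by omega) (by omega)
  have := key 0 (by omega)
  rw [show ((0:Nat) : Int) = 0 from rfl] at this
  rw [this]

-- find? over the descending range from 'last' returns the last zero's index
theorem find_last_some (l : List Int) (lz : Nat) (last : Int)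
    (h1 : (lz : Int) ≤ last) (h2 : last < l.length)
    (h0 : l.getD lz 1 = 0) (hmax : ∀ j : Nat, lz < j → j < l.length → l.getD j 1 ≠ 0) :
    pyFindLast l last = (lz : Int) := by
  unfold pyFindLast
  have key : ∀ n : Nat, ∀ b : Int, (lz : Int) ≤ b → b < l.length → (b - lz).toNat = n →
      (PySem.List.pyRange b (-1) (-1)).find?
        (fun i => PySem.List.pyGetD l i 1 == 0) = some (lz : Int) := by
    intro n
    induction n with
    | zero =>
      intro b hb1 hb2 hb3
      have : b = (lz : Int) := by omega
      subst this
      rw [PySem.List.pyRange_neg_one_cons (by omega)]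
      rw [List.find?_cons]
      have : (PySem.List.pyGetD l (lz : Int) 1 == 0) = true := by
        rw [PySem.List.pyGetD_natCast, h0]; rfl
      rw [this]
    | succ m ihm =>
      intro b hb1 hb2 hb3
      have hlt : (lz : Int) < b := by omega
      rw [PySem.List.pyRange_neg_one_cons (by omega)]
      rw [List.find?_cons]
      have hnz : (PySem.List.pyGetD l b 1 == 0) = false := by
        rw [show b = ((b.toNat : Nat) : Int) by omega, PySem.List.pyGetD_natCast]
        exact beq_eq_false_iff_ne.mpr (hmax b.toNat (by omega) (by omega))
      rw [hnz]
      exact ihm (b - 1) (by omega) (by omega) (by omega)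
  rw [key (last - lz).toNat last h1 h2 rfl]

-- existence of the first and last zero
theorem exists_first_zero (l : List Int) (h : (0:Int) ∈ l) :
    ∃ fz : Nat, fz < l.length ∧ l.getD fz 1 = 0 ∧ ∀ j, j < fz → l.getD j 1 ≠ 0 := by
  induction l with
  | nil => simp at h
  | cons x xs ih =>
    by_cases hx : x = 0
    · exact ⟨0, by simp, by simp [hx], by omega⟩
    · rcases List.mem_cons.1 h with h0 | h0
      · exact absurd h0.symm hx
      · rcases ih h0 with ⟨fz, ha, hb, hc⟩
        refine ⟨fz + 1, by simpa using ha, by simpa using hb, ?_⟩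
        intro j hj
        cases j with
        | zero => simpa using hx
        | succ k => simpa using hc k (by omega)

theorem exists_last_zero (l : List Int) (h : (0:Int) ∈ l) :
    ∃ lz : Nat, lz < l.length ∧ l.getD lz 1 = 0 ∧
      ∀ j : Nat, lz < j → j < l.length → l.getD j 1 ≠ 0 := by
  induction l with
  | nil => simp at h
  | cons x xs ih =>
    by_cases hxs : (0:Int) ∈ xs
    · rcases ih hxs with ⟨lz, ha, hb, hc⟩
      refine ⟨lz + 1, by simpa using ha, by simpa using hb, ?_⟩
      intro j hj1 hj2
      cases j with
      | zero => omega
      | succ k => simpa using hc k (by omega) (by simpa using hj2)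
    · have hx : x = 0 := by
        rcases List.mem_cons.1 h with h0 | h0
        · exact h0.symm
        · exact absurd h0 hxs
      refine ⟨0, by simp, by simp [hx], ?_⟩
      intro j hj1 hj2
      cases j with
      | zero => omega
      | succ k =>
        simp only [List.getD_cons_succ]
        intro hc
        have hk : k < xs.length := by simpa using hj2
        rw [List.getD_eq_getElem xs 1 hk] at hc
        exact hxs (hc ▸ List.getElem_mem hk)

-- flipping up to (and including) the last zero lowers B's count by one
theorem second_flip (l1 : List Int) (lz : Nat) (hlz : lz < l1.length)
    (h0 : l1.getD lz 1 = 0) (hmax : lz + 1 < l1.length → l1.getD (lz + 1) 1 ≠ 0) :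
    (pvFP (pvFlipP (lz + 1) l1)).2 = (pvFP l1).2 - 1 := by
  rw [pvFP_flip l1 (lz + 1) (by omega) (by omega)]
  rw [pvBit_eq (lz + 1) l1 (by omega) (by simpa using hlz)]
  by_cases hh : lz + 1 < l1.length
  · rw [if_pos hh]
    have hcond : ((l1.getD (lz + 1 - 1) 1 != 0) != (l1.getD (lz + 1) 1 != 0)) = true := by
      simp only [Nat.add_sub_cancel, h0]
      rw [show (l1.getD (lz + 1) 1 != 0) = true from bne_iff_ne.mpr (hmax hh)]
      decide
    rw [if_pos hcond]
    omega
  · rw [if_neg hh]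
    have hcond : (l1.getD (lz + 1 - 1) 1 == 0) = true := by
      simp only [Nat.add_sub_cancel, h0]
      decide
    rw [if_pos hcond]
    omega

-- the step equation of A's while loop (zeta-reduced form of the match arm)
theorem loopA_succ (fuel : Nat) (stack : List Int) (last flips : Int)
    (h : stack.sum < (stack.length : Int)) :
    loopA (fuel + 1) stack last flips =
      loopA fuel
        (pyFlipPancakes
          (if pyFindFirst stack ≥ 0 then (pyFlipPancakes stack (pyFindFirst stack), flips + 1)
           else (stack, flips)).1
          (pyFindLast stack last))
        (pyFindLast stack last)
        ((if pyFindFirst stack ≥ 0 then (pyFlipPancakes stack (pyFindFirst stack), flips + 1)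
          else (stack, flips)).2 + 1) := by
  rw [loopA, if_pos h]

-- one pass of A's while body spends exactly the flips that B's count loses
theorem loop_spec : ∀ (fuel : Nat) (l : List Int) (last flips : Int),
    (∀ x ∈ l, x = 0 ∨ x = 1) →
    (∀ j : Nat, j < l.length → l.getD j 1 = 0 → (j : Int) ≤ last) →
    last < l.length →
    ((pvFP l).2).toNat < fuel →
    loopA fuel l last flips = flips + (pvFP l).2 := by
  intro fuel
  induction fuel with
  | zero => intro l last flips _ _ _ hf; omega
  | succ fuel ih =>
    intro l last flips hb hinv hlast hfuel
    by_cases hguard : l.sum < (l.length : Int)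
    · rw [loopA_succ fuel l last flips hguard]
      have hzero : (0:Int) ∈ l := (sum_lt_iff l hb).1 hguard
      have hFpos : 1 ≤ (pvFP l).2 := pvFP_pos l hzero
      rcases exists_first_zero l hzero with ⟨fz, hfz, hfz0, hfzmin⟩
      rcases exists_last_zero l hzero with ⟨lz, hlz, hlz0, hlzmax⟩
      have hfzlz : fz ≤ lz := by
        by_contra hc
        exact hfzmin lz (by omega) hlz0
      have hfind_last : pyFindLast l last = (lz : Int) :=
        find_last_some l lz last (hinv lz hlz hlz0) hlast hlz0 hlzmax
      have hfind_first : pyFindFirst l = (fz : Int) - 1 :=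
        find_first_some l fz hfz hfz0 hfzmin
      rw [hfind_last, hfind_first]
      by_cases hge : 1 ≤ fz
      · -- two flips: at first = fz - 1 and at last = lz
        rw [if_pos (by omega : (fz : Int) - 1 ≥ 0)]
        simp only
        rw [pyFlip_eq l ((fz : Int) - 1) (by omega) (by omega),
            show ((fz : Int) - 1 + 1).toNat = fz by omega]
        have hlen1 : (pvFlipP fz l).length = l.length := length_pvFlipP fz l
        rw [pyFlip_eq (pvFlipP fz l) (lz : Int) (by omega) (by omega),
            show ((lz : Int) + 1).toNat = lz + 1 by omega]
        have hgetD1 : ∀ j : Nat, fz ≤ j → (pvFlipP fz l).getD j 1 = l.getD j 1 := by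
          intro j hj
          rw [pvFlipP_getD fz l j (by omega)]; simp [Nat.not_lt.2 hj]
        have hF1 : (pvFP (pvFlipP fz l)).2 = (pvFP l).2 - 1 := by
          rw [pvFP_flip l fz hge (by omega),
              pvBit_eq fz l hge (by omega), if_pos hfz]
          have hcond : ((l.getD (fz - 1) 1 != 0) != (l.getD fz 1 != 0)) = true := by
            rw [hfz0]
            rw [show (l.getD (fz - 1) 1 != 0) = true from
                bne_iff_ne.mpr (hfzmin (fz - 1) (by omega))]
            decide
          rw [if_pos hcond]
          omega
        have hF2 : (pvFP (pvFlipP (lz + 1) (pvFlipP fz l))).2 = (pvFP l).2 - 2 := by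
          rw [second_flip (pvFlipP fz l) lz (by omega)
              (by rw [hgetD1 lz hfzlz]; exact hlz0)
              (by intro hlt; rw [hgetD1 (lz + 1) (by omega)]
                  exact hlzmax (lz + 1) (by omega) (by omega))]
          omega
        rw [ih (pvFlipP (lz + 1) (pvFlipP fz l)) (lz : Int) (flips + 1 + 1)
            (binary_pvFlipP _ _ (binary_pvFlipP _ _ hb))
            (by intro j hj hj0
                by_contra hc
                rw [pvFlipP_getD (lz + 1) _ j (by omega)] at hj0
                rw [if_neg (by omega)] at hj0
                rw [hgetD1 j (by omega)] at hj0
                exact hlzmax j (by omega) (by simp [length_pvFlipP] at hj; omega) hj0)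
            (by rw [length_pvFlipP, hlen1]; exact_mod_cast hlz)
            (by omega)]
        omega
      · -- fz = 0 : only the flip at last = lz
        rw [if_neg (by omega : ¬ ((fz : Int) - 1 ≥ 0))]
        simp only
        rw [pyFlip_eq l (lz : Int) (by omega) (by exact_mod_cast hlz),
            show ((lz : Int) + 1).toNat = lz + 1 by omega]
        have hF2 : (pvFP (pvFlipP (lz + 1) l)).2 = (pvFP l).2 - 1 :=
          second_flip l lz hlz hlz0
            (fun hlt => hlzmax (lz + 1) (by omega) (by omega))
        rw [ih (pvFlipP (lz + 1) l) (lz : Int) (flips + 1)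
            (binary_pvFlipP _ _ hb)
            (by intro j hj hj0
                by_contra hc
                rw [pvFlipP_getD (lz + 1) _ j (by omega), if_neg (by omega)] at hj0
                exact hlzmax j (by omega) (by simp [length_pvFlipP] at hj; omega) hj0)
            (by rw [length_pvFlipP]; exact_mod_cast hlz)
            (by omega)]
        omega
    · rw [show loopA (fuel + 1) l last flips = flips from by rw [loopA, if_neg hguard]]
      have hno : ∀ x ∈ l, x ≠ 0 := by
        intro x hx hc
        exact hguard ((sum_lt_iff l hb).2 (hc ▸ hx))
      rw [(pvFP_all_one l hno).1, add_zero]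

-- ===== VERDICT (by name: the statement is the Claim_ definition above) =====
theorem make_happy_pancakes_spec : Claim_equal_make_happy_pancakes := by
  intro stack _ hpre
  unfold Spec_make_happy_pancakes
  rw [alt_eq_pvFP]
  unfold make_happy_pancakes
  rcases hpre with hb | ⟨hsum, hnz⟩
  · rw [loop_spec (stack.length + 1) stack ((stack.length : Int) - 1) 0 hb
        (fun j hj _ => by omega) (by omega)
        (by have h1 := pvFP_le_len stack; have h2 := pvFP_nonneg stack; omega)]
    omega
  · have hguard : ¬ stack.sum < (stack.length : Int) := by omega
    rw [show loopA (stack.length + 1) stack ((stack.length : Int) - 1) 0 = 0 from by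
          rw [loopA, if_neg hguard]]
    rw [(pvFP_all_one stack hnz).1]
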